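-- pv_equiv track=rewrite | github.com/maximperevoznikov/PythonBasicsLabs | lab4-2.py | func
-- ===== SOURCE A (Python) =====
-- def func(string):
--     substr = ""
--     newsubstr = ""
--     for char in string:
--         if char != newsubstr[:1]:
--             newsubstr+=char
--         else:
--             if newsubstr > substr:
--                 substr = newsubstr
--             newsubstr = ""
--             newsubstr+=char
--     return substr
-- ===== SOURCE B (Python) =====
-- def func(string):
--     # Stage 1: compute segment boundary indices by jumping with str.find
--     # (a segment ends at the next occurrence of its first character).
--     n = len(string)
--     bounds = [0]
--     while bounds[-1] < n:
--         j = string.find(string[bounds[-1]], bounds[-1] + 1)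
--         if j == -1:
--             break
--         bounds.append(j)
--     # Stage 2: slice out the completed segments (consecutive boundary pairs;
--     # the trailing open segment has no closing boundary) and reduce with max.
--     return max((string[a:b] for a, b in zip(bounds, bounds[1:])), default="")
-- ===== Notes on version B (the rewrite author's own statement) =====
-- stated objective: alternative
-- what changed: A scans character by character, growing the current segment by string concatenation and threading a running max; B never walks characters one by one: it jumps between segment boundaries with str.find (stage 1 collects the boundary indices), then slices the segments out and reduces them with max(..., default='').
import Mathlib
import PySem

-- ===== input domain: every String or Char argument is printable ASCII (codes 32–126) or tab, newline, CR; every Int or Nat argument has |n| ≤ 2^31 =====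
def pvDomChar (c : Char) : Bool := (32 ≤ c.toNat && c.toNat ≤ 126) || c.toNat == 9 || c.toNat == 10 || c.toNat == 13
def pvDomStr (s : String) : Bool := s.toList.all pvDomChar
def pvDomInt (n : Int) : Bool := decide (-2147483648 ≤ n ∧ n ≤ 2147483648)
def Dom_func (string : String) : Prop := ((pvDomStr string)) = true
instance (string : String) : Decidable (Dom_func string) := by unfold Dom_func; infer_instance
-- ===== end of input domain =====

-- B replaces A's character-by-character accumulator loop with str.find-based index
-- jumps: stage 1 computes the segment boundary indices, stage 2 slices the segments
-- out of the string and reduces them with max (alternative decomposition, same cost).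

-- ===== PORT A =====
-- A's loop state: (substr, newsubstr) as code-point lists (Python str '<'/'>' is Lean '<' on List Char).
-- newsubstr[:1] is PySem.List.slice newsubstr none (some 1).
def funcStepA (st : List Char × List Char) (char : Char) : List Char × List Char :=
  if [char] ≠ PySem.List.slice st.2 none (some 1) then
    (st.1, st.2 ++ [char])
  else
    (if st.1 < st.2 then st.2 else st.1, [char])

def func (string : String) : String :=
  String.ofList (string.toList.foldl funcStepA ([], [])).1

-- ===== PORT B =====
-- Source B's while loop building `bounds`: from the last bound `start`, jump to
-- j = string.find(string[start], start + 1); stop at end of string or j == -1.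
-- The guard `start < n` makes s[start] well-defined (exactly Source B's loop condition).
def funcBoundsGo (s : List Char) (start : Nat) : List Int :=
  if h : start < s.length then
    if hj : PySem.Chars.findFrom s [s[start]] ((start + 1 : Nat) : Int) = -1 then
      [(start : Int)]
    else
      (start : Int) :: funcBoundsGo s (PySem.Chars.findFrom s [s[start]] ((start + 1 : Nat) : Int)).toNat
  else [(start : Int)]
termination_by s.length - start
decreasing_by
  have hk : start + 1 ≤ s.length := h
  have hsp := PySem.Chars.findFrom_natCast_spec s [s[start]] (start + 1) hk hj
  omega

-- max(generator of slices string[a:b] over consecutive bound pairs, default="")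
def func_alt (string : String) : String :=
  String.ofList
    (PySem.List.maxD
      (((funcBoundsGo string.toList 0).zip (funcBoundsGo string.toList 0).tail).map
        (fun p => PySem.List.slice string.toList (some p.1) (some p.2)))
      (fun y => y) [])

-- ===== PRECONDITION & SPEC =====
def Spec_func (string : String) (out : String) : Prop := out = func_alt string
instance (string : String) (out : String) : Decidable (Spec_func string out) := by unfold Spec_func; infer_instance

-- ===== CLAIM (what is proved, stated in full; the proofs are below) =====
def Claim_equal_func : Prop := ∀ (string : String), Dom_func string → Spec_func string (func string)

-- ===== LEMMAS AND PROOFS =====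

-- Proof-side segment scanner (the character-level reading of both programs):
-- scanStep collects completed segments, cutting when char equals the head of the
-- current segment; it mediates between A's running max and B's boundary jumps.
def scanStep (st : List (List Char) × List Char) (char : Char) : List (List Char) × List Char :=
  if st.2.head? = some char then (st.1 ++ [st.2], [char]) else (st.1, st.2 ++ [char])

-- The jump-level reading: pending segment is c :: u; the next cut is at the first
-- occurrence of c in t.
def segsJumpP (c : Char) (u t : List Char) : List (List Char) :=
  match h : PySem.List.index? t c with
  | none => []
  | some m => (c :: (u ++ t.take m)) :: segsJumpP c [] (t.drop (m + 1))
termination_by t.length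
decreasing_by
  obtain ⟨hk, -, -⟩ := PySem.List.getElem_of_index?_eq_some h
  simp only [List.length_drop]; omega

lemma segsJumpP_none (c : Char) (u t : List Char) (h : PySem.List.index? t c = none) :
    segsJumpP c u t = [] := by
  rw [segsJumpP.eq_def]
  split
  · rfl
  · next m heq => rw [h] at heq; simp at heq

lemma segsJumpP_some (c : Char) (u t : List Char) (m : Nat)
    (h : PySem.List.index? t c = some m) :
    segsJumpP c u t = (c :: (u ++ t.take m)) :: segsJumpP c [] (t.drop (m + 1)) := by
  rw [segsJumpP.eq_def]
  split
  · next heq => rw [h] at heq; simp at heq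
  · next m' heq => rw [h] at heq; cases heq; rfl

lemma segsJumpP_ne_nil : ∀ (c : Char) (u t : List Char), ∀ g ∈ segsJumpP c u t, g ≠ [] := by
  intro c u t
  induction u, t using segsJumpP.induct (c := c) with
  | case1 u t h => rw [segsJumpP_none c u t h]; simp
  | case2 u t m h ih =>
    rw [segsJumpP_some c u t m h]
    intro g hg
    rcases List.mem_cons.1 hg with hg | hg
    · simp [hg]
    · exact ih g hg

-- A's running max over the list of completed segments.
def runmax (segs : List (List Char)) : List Char :=
  segs.foldl (fun m g => if m < g then g else m) []

lemma runmax_append (segs : List (List Char)) (g : List Char) :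
    runmax (segs ++ [g]) = if runmax segs < g then g else runmax segs := by
  simp [runmax, List.foldl_append]

lemma max?_cons_cons (m g : List Char) (t : List (List Char)) :
    PySem.List.max? (m :: g :: t) (fun y => y)
      = PySem.List.max? ((if m < g then g else m) :: t) (fun y => y) := by
  simp only [PySem.List.max?, List.foldl_cons]
  by_cases h : m < g <;> simp [h]

lemma max?_id_runfold (t : List (List Char)) :
    ∀ m, PySem.List.max? (m :: t) (fun y => y)
      = some (t.foldl (fun m' g => if m' < g then g else m') m) := by
  induction t with
  | nil => intro m; simp [PySem.List.max?]
  | cons g t ih =>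
    intro m
    rw [max?_cons_cons, ih]
    simp [List.foldl_cons]

lemma runmax_eq_maxD (segs : List (List Char)) (hne : ∀ g ∈ segs, g ≠ []) :
    runmax segs = PySem.List.maxD segs (fun y => y) [] := by
  cases segs with
  | nil => simp [runmax, PySem.List.maxD, PySem.List.max?]
  | cons x t =>
    have hx : ([] : List Char) < x := by
      cases x with
      | nil => exact absurd rfl (hne _ (by simp))
      | cons a l => exact (List.lt_iff_lex_lt _ _).2 List.Lex.nil
    simp only [PySem.List.maxD]
    rw [max?_id_runfold]
    simp only [runmax, List.foldl_cons, if_pos hx, Option.getD_some]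

-- loop invariant: after any prefix, A's newsubstr = the scanner's cur, A's substr =
-- runmax of the scanner's segments, and every completed segment is nonempty.
lemma loop_inv (l : List Char) :
    ∀ (s ns : List Char) (segs : List (List Char)),
      (∀ g ∈ segs, g ≠ []) → s = runmax segs →
      (l.foldl funcStepA (s, ns)).2 = (l.foldl scanStep (segs, ns)).2
      ∧ (∀ g ∈ (l.foldl scanStep (segs, ns)).1, g ≠ [])
      ∧ (l.foldl funcStepA (s, ns)).1 = runmax (l.foldl scanStep (segs, ns)).1 := by
  induction l with
  | nil => intro s ns segs hne hs; exact ⟨rfl, hne, hs⟩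
  | cons char rest ih =>
    intro s ns segs hne hs
    by_cases h : ns.head? = some char
    · have hguard : ¬ ([char] ≠ PySem.List.slice ns none (some 1)) := by
        cases ns with
        | nil => simp at h
        | cons c t =>
          simp only [Option.some.injEq, List.head?_cons] at h
          simp [PySem.List.slice, PySem.List.clampIdx, h]
      have hA : funcStepA (s, ns) char = (if s < ns then ns else s, [char]) := by
        simp [funcStepA, hguard]
      have hB : scanStep (segs, ns) char = (segs ++ [ns], [char]) := by
        simp [scanStep, h]
      have hnsne : ns ≠ [] := by cases ns <;> simp_all
      have hne' : ∀ g ∈ segs ++ [ns], g ≠ [] := by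
        intro g hg
        rcases List.mem_append.1 hg with hg | hg
        · exact hne g hg
        · simp only [List.mem_singleton] at hg; simpa [hg] using hnsne
      have hs' : (if s < ns then ns else s) = runmax (segs ++ [ns]) := by
        rw [runmax_append, hs]
      simp only [List.foldl_cons, hA, hB]
      exact ih _ _ _ hne' hs'
    · have hguard : [char] ≠ PySem.List.slice ns none (some 1) := by
        cases ns with
        | nil => simp [PySem.List.slice, PySem.List.clampIdx]
        | cons c t =>
          simp only [List.head?_cons, Option.some.injEq] at h
          simp [PySem.List.slice, PySem.List.clampIdx, Ne.symm h]
      have hA : funcStepA (s, ns) char = (s, ns ++ [char]) := by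
        simp [funcStepA, hguard]
      have hB : scanStep (segs, ns) char = (segs, ns ++ [char]) := by
        simp [scanStep, h]
      simp only [List.foldl_cons, hA, hB]
      exact ih _ _ _ hne hs

-- the scanner never cuts while no pending char recurs
lemma scan_no_break (t : List Char) : ∀ (c : Char) (u : List Char) (segs : List (List Char)),
    c ∉ t → t.foldl scanStep (segs, c :: u) = (segs, c :: (u ++ t)) := by
  induction t with
  | nil => intro c u segs _; simp
  | cons a t ih =>
    intro c u segs h
    have hca : c ≠ a := by intro he; exact h (by simp [he])
    have hstep : scanStep (segs, c :: u) a = (segs, c :: (u ++ [a])) := by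
      simp [scanStep, hca]
    simp only [List.foldl_cons, hstep]
    rw [ih c (u ++ [a]) segs (fun hm => h (List.mem_cons_of_mem a hm))]
    simp

-- char-level scan = jump-level segments
lemma scan_eq : ∀ (c : Char) (u t : List Char), c ∉ u → ∀ (segs : List (List Char)),
    (t.foldl scanStep (segs, c :: u)).1 = segs ++ segsJumpP c u t := by
  intro c u t
  induction u, t using segsJumpP.induct (c := c) with
  | case1 u t h =>
    intro _ segs
    have hmem : c ∉ t := (PySem.List.index?_eq_none_iff t c).1 h
    rw [scan_no_break t c u segs hmem, segsJumpP_none c u t h]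
    simp
  | case2 u t m h ih =>
    intro _ segs
    obtain ⟨pre, suf, ht, hlen, hcpre⟩ := (PySem.List.index?_eq_some_iff t c m).1 h
    have htake : t.take m = pre := by rw [ht, ← hlen]; exact List.take_left
    have hdropm : t.drop m = c :: suf := by rw [ht, ← hlen]; exact List.drop_left
    have hdrop : t.drop (m + 1) = suf := by
      have h1 : t.drop (m + 1) = (t.drop m).drop 1 := by rw [List.drop_drop]
      rw [h1, hdropm]; rfl
    have hfold : t.foldl scanStep (segs, c :: u)
        = suf.foldl scanStep (scanStep (segs, c :: (u ++ pre)) c) := by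
      rw [ht, List.foldl_append, scan_no_break pre c u segs hcpre, List.foldl_cons]
    have hcut : scanStep (segs, c :: (u ++ pre)) c = (segs ++ [c :: (u ++ pre)], [c]) := by
      simp [scanStep]
    rw [hfold, hcut, segsJumpP_some c u t m h, htake, hdrop]
    have hrec := ih (by simp) (segs ++ [c :: (u ++ pre)])
    rw [hdrop] at hrec
    rw [hrec]
    simp

-- str.find of a single character is the first index of that character
lemma singleton_prefix_iff (c : Char) (l : List Char) : [c] <+: l ↔ l.head? = some c := by
  cases l with
  | nil => simp
  | cons a t => simp [List.cons_prefix_cons, eq_comm]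

lemma find_singleton (t : List Char) (c : Char) :
    PySem.Chars.find t [c]
      = match PySem.List.index? t c with | none => -1 | some m => (m : Int) := by
  cases hidx : PySem.List.index? t c with
  | none =>
    have hmem : c ∉ t := (PySem.List.index?_eq_none_iff t c).1 hidx
    show PySem.Chars.find t [c] = -1
    exact (PySem.Chars.find_eq_neg_one_iff t [c]).2
      (fun hinf => hmem (hinf.subset (by simp)))
  | some m =>
    obtain ⟨pre, suf, ht, hlen, hcpre⟩ := (PySem.List.index?_eq_some_iff t c m).1 hidx
    have hinf : [c] <:+: t := by rw [ht]; exact ⟨pre, suf, by simp⟩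
    have hne : PySem.Chars.find t [c] ≠ -1 := by
      rw [Ne, PySem.Chars.find_eq_neg_one_iff]; exact fun hn => hn hinf
    have hge : 0 ≤ PySem.Chars.find t [c] := by
      have := PySem.Chars.neg_one_le_find t [c]; omega
    obtain ⟨hpre, hmin⟩ := PySem.Chars.find_spec hge
    have hm_pre : [c] <+: t.drop m := by
      rw [ht, ← hlen, List.drop_left, singleton_prefix_iff]; rfl
    have hle : (PySem.Chars.find t [c]).toNat ≤ m := by
      by_contra hlt
      exact hmin m (by omega) hm_pre
    have hge2 : m ≤ (PySem.Chars.find t [c]).toNat := by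
      by_contra hlt
      rw [not_le] at hlt
      have hh : t[(PySem.Chars.find t [c]).toNat]? = some c := by
        rw [← List.head?_drop]
        exact (singleton_prefix_iff c _).1 hpre
      generalize hj : (PySem.Chars.find t [c]).toNat = j at hh hlt
      rw [ht] at hh
      rw [List.getElem?_append_left (by omega : j < pre.length)] at hh
      exact hcpre (List.mem_of_getElem? hh)
    show PySem.Chars.find t [c] = (m : Int)
    omega

-- B's slices over consecutive bounds
def segsOf (s : List Char) (bs : List Int) : List (List Char) :=
  (bs.zip bs.tail).map (fun p => PySem.List.slice s (some p.1) (some p.2))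

lemma segsOf_cons_cons (s : List Char) (a b : Int) (l : List Int) :
    segsOf s (a :: b :: l) = PySem.List.slice s (some a) (some b) :: segsOf s (b :: l) := rfl

lemma funcBoundsGo_cons (s : List Char) (k : Nat) :
    ∃ rest, funcBoundsGo s k = (k : Int) :: rest := by
  rw [funcBoundsGo.eq_def]
  split_ifs <;> exact ⟨_, rfl⟩

-- B's boundary jumps produce exactly the jump-level segments
lemma bounds_segs (s : List Char) : ∀ (start : Nat),
    segsOf s (funcBoundsGo s start)
      = (match s.drop start with | [] => [] | c :: t => segsJumpP c [] t) := by
  intro start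
  induction start using funcBoundsGo.induct (s := s) with
  | case3 start h =>
    have hdrop : s.drop start = [] := List.drop_eq_nil_of_le (by omega)
    rw [funcBoundsGo.eq_def, dif_neg h, hdrop]
    simp [segsOf]
  | case1 start h hj =>
    have hk : start + 1 ≤ s.length := h
    have hdrop : s.drop start = s[start] :: s.drop (start + 1) := List.drop_eq_getElem_cons h
    have hfind : PySem.Chars.find (s.drop (start + 1)) [s[start]] = -1 := by
      rw [PySem.Chars.findFrom_natCast s [s[start]] (start + 1) hk] at hj
      by_cases hf : PySem.Chars.find (s.drop (start + 1)) [s[start]] = -1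
      · exact hf
      · rw [if_neg hf] at hj
        have := PySem.Chars.neg_one_le_find (s.drop (start + 1)) [s[start]]
        omega
    have hidx : PySem.List.index? (s.drop (start + 1)) s[start] = none := by
      cases hx : PySem.List.index? (s.drop (start + 1)) s[start] with
      | none => rfl
      | some m =>
        rw [find_singleton, hx] at hfind
        simp at hfind
    rw [funcBoundsGo.eq_def, dif_pos h, dif_pos hj, hdrop]
    show segsOf s [(start : Int)] = segsJumpP s[start] [] (s.drop (start + 1))
    rw [segsJumpP_none _ _ _ hidx]
    simp [segsOf]
  | case2 start h hj ih =>
    have hk : start + 1 ≤ s.length := h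
    have hdrop : s.drop start = s[start] :: s.drop (start + 1) := List.drop_eq_getElem_cons h
    rw [PySem.Chars.findFrom_natCast s [s[start]] (start + 1) hk] at hj ih
    have hfind : PySem.Chars.find (s.drop (start + 1)) [s[start]] ≠ -1 := by
      intro hf; rw [if_pos hf] at hj; exact hj rfl
    obtain ⟨m, hidx⟩ : ∃ m, PySem.List.index? (s.drop (start + 1)) s[start] = some m := by
      cases hx : PySem.List.index? (s.drop (start + 1)) s[start] with
      | none => rw [find_singleton, hx] at hfind; exact absurd rfl hfind
      | some m => exact ⟨m, rfl⟩
    have hfm : PySem.Chars.find (s.drop (start + 1)) [s[start]] = (m : Int) := by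
      rw [find_singleton, hidx]
    have hto : (if PySem.Chars.find (s.drop (start + 1)) [s[start]] = -1 then (-1 : Int)
        else ((start + 1 : Nat) : Int) + PySem.Chars.find (s.drop (start + 1)) [s[start]]).toNat
        = start + 1 + m := by
      rw [if_neg hfind, hfm]; omega
    rw [hto] at ih
    obtain ⟨hmlt, hgm, -⟩ := PySem.List.getElem_of_index?_eq_some hidx
    have hdrop2 : s.drop (start + 1 + m) = s[start] :: (s.drop (start + 1)).drop (m + 1) := by
      have e1 : s.drop (start + 1 + m) = (s.drop (start + 1)).drop m := by
        rw [List.drop_drop]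
      rw [e1, List.drop_eq_getElem_cons hmlt, hgm]
    rw [hdrop2] at ih
    have ih' : segsOf s (funcBoundsGo s (start + 1 + m))
        = segsJumpP s[start] [] ((s.drop (start + 1)).drop (m + 1)) := ih
    have hslice : PySem.List.slice s (some (start : Int)) (some ((start + 1 + m : Nat) : Int))
        = s[start] :: (s.drop (start + 1)).take m := by
      rw [PySem.List.slice_natCast]
      have h1 : start + 1 + m - start = m + 1 := by omega
      rw [h1, hdrop]
      rfl
    rw [funcBoundsGo.eq_def, dif_pos h]
    rw [PySem.Chars.findFrom_natCast s [s[start]] (start + 1) hk]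
    rw [dif_neg hj, hto, hdrop]
    obtain ⟨rest, hcons⟩ := funcBoundsGo_cons s (start + 1 + m)
    rw [hcons, segsOf_cons_cons, ← hcons]
    show _ = segsJumpP s[start] [] (s.drop (start + 1))
    rw [hslice, ih']
    have hsome := segsJumpP_some s[start] [] (s.drop (start + 1)) m hidx
    simp only [List.nil_append] at hsome
    exact hsome.symm

-- ===== VERDICT (by name: the statement is the Claim_ definition above) =====
theorem func_spec : Claim_equal_func := by
  intro string _
  unfold Spec_func func func_alt
  cases hs : string.toList with
  | nil =>
    rw [funcBoundsGo.eq_def]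
    simp [PySem.List.maxD, PySem.List.max?]
  | cons c t =>
    simp only [List.foldl_cons]
    have hstep1 : funcStepA ([], []) c = ([], [c]) := by
      simp [funcStepA, PySem.List.slice, PySem.List.clampIdx]
    rw [hstep1]
    obtain ⟨-, hne, hmax⟩ := loop_inv t [] [c] [] (by simp) (by simp [runmax])
    rw [hmax, scan_eq c [] t (by simp) []]
    have hseg : ((funcBoundsGo (c :: t) 0).zip (funcBoundsGo (c :: t) 0).tail).map
        (fun p => PySem.List.slice (c :: t) (some p.1) (some p.2))
        = segsOf (c :: t) (funcBoundsGo (c :: t) 0) := rfl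
    rw [hseg, bounds_segs (c :: t) 0]
    have hm : (match (c :: t : List Char).drop 0 with
        | [] => ([] : List (List Char)) | c :: t => segsJumpP c [] t) = segsJumpP c [] t := rfl
    rw [hm, ← runmax_eq_maxD _ (segsJumpP_ne_nil c [] t)]
    simp
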